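-- pv_equiv track=rewrite | github.com/SupraSummus/hextrans-pak128 | landscape/grounds/texture-hex-lightmap/render.py | slope_is_valid
-- ===== SOURCE A (Python) =====
-- CORNER_COUNT = 6
--
-- CORNER_WEIGHTS = (1, 4, 16, 64, 256, 1024)
--
-- def decode_corner_heights(slope: int) -> list[int]:
--     return [(slope // CORNER_WEIGHTS[i]) % 4 for i in range(CORNER_COUNT)]
--
-- def slope_is_valid(slope: int) -> bool:
--     """Whether a raw slope_t encoding is a normalised pakset slope.
--
--     Two constraints:
--
--     * **Per-edge delta ≤ 1.** The constraint `synth_overlay::init`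
--       enforces — slopes with a steeper jump can't appear on real
--       terrain.
--
--     * **min(corner_heights) == 0.** Base elevation lives in the tile's
--       `hgt` field, not in the slope encoding, so e.g. (1,1,1,0,0,0)
--       and (2,2,2,1,1,1) describe the same shape at different absolute
--       heights.  The pakset only emits one cell per shape; the engine's
--       hex-aware ground lookup is responsible for normalising
--       `slope_t` → `slope_t - min(ch)` before indexing the atlas.
--
--     Yields 141 distinct shapes out of 4096 raw slope_t values.
--     """
--     ch = decode_corner_heights(slope)
--     if min(ch) != 0:
--         return False
--     for i in range(CORNER_COUNT):
--         j = (i + 1) % CORNER_COUNT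
--         if ch[i] > ch[j] + 1 or ch[j] > ch[i] + 1:
--             return False
--     return True
-- ===== SOURCE B (Python) =====
-- # The six base-4 corner digits of a slope depend only on slope % 4096
-- # (every corner weight divides 4096 and 4096/weight is a multiple of 4),
-- # so validity is a pure function of the low 12 bits: look the residue up
-- # in the precomputed table of the 141 valid encodings.
-- _VALID_SLOPES = frozenset((
--     0, 1, 4, 5, 16, 17, 20, 21, 25, 64, 65, 68,
--     69, 80, 81, 84, 85, 89, 100, 101, 105, 256, 257, 260,
--     261, 272, 273, 276, 277, 281, 320, 321, 324, 325, 336, 337,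
--     340, 341, 345, 356, 357, 361, 400, 401, 404, 405, 409, 420,
--     421, 425, 441, 1024, 1025, 1028, 1029, 1030, 1040, 1041, 1044, 1045,
--     1046, 1049, 1050, 1088, 1089, 1092, 1093, 1094, 1104, 1105, 1108, 1109,
--     1110, 1113, 1114, 1124, 1125, 1126, 1129, 1130, 1134, 1280, 1281, 1284,
--     1285, 1286, 1296, 1297, 1300, 1301, 1302, 1305, 1306, 1344, 1345, 1348,
--     1349, 1350, 1360, 1361, 1364, 1380, 1424, 1425, 1428, 1444, 1600, 1601,
--     1604, 1605, 1606, 1616, 1617, 1620, 1636, 1680, 1681, 1684, 1700, 1764,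
--     2305, 2309, 2310, 2321, 2325, 2326, 2329, 2330, 2331, 2369, 2373, 2374,
--     2385, 2449, 2625, 2629, 2630, 2641, 2705, 2961, 3654,
-- ))
--
--
-- def slope_is_valid(slope: int) -> bool:
--     """Table lookup: valid iff slope % 4096 is one of the 141 valid encodings."""
--     return slope % 4096 in _VALID_SLOPES
-- ===== Notes on version B (the rewrite author's own statement) =====
-- stated objective: alternative
-- what changed: B replaces A's digit decoding plus min/adjacency loops by a single precomputed lookup table: since every corner weight divides 4096, validity depends only on slope % 4096, and B tests membership of that residue in the hardcoded frozenset of the 141 valid encodings.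
import Mathlib
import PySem

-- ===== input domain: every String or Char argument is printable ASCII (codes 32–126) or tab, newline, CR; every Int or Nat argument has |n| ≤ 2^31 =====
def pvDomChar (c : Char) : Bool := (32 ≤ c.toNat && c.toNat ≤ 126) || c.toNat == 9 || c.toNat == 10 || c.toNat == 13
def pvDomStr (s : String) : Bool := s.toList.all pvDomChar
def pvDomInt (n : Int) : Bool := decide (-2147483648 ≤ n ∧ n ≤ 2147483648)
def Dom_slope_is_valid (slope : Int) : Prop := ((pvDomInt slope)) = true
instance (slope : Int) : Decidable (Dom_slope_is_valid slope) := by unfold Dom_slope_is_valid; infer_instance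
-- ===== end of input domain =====

-- B replaces A's digit decoding and min/adjacency loops by a lookup of slope % 4096 in a precomputed table of the 141 valid encodings (alternative algorithm, same cost).

-- ===== PORT A =====
def CORNER_COUNT : Int := 6

def CORNER_WEIGHTS : List Int := [1, 4, 16, 64, 256, 1024]

-- CORNER_WEIGHTS[i]: i ranges over range(6), always in range, so the IndexError default is never taken
def decode_corner_heights (slope : Int) : List Int :=
  (PySem.List.pyRange 0 CORNER_COUNT 1).map
    (fun i => PySem.Int.mod (PySem.Int.floordiv slope ((PySem.List.pyGet? CORNER_WEIGHTS i).getD 0)) 4)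

-- the for-loop with its early returns, as structural recursion over range(CORNER_COUNT)
def slopeALoop (ch : List Int) : List Int → Bool
  | [] => true
  | i :: rest =>
    let j := PySem.Int.mod (i + 1) CORNER_COUNT
    let chi := (PySem.List.pyGet? ch i).getD 0   -- i, j always in range for the 6-element ch
    let chj := (PySem.List.pyGet? ch j).getD 0
    if chi > chj + 1 ∨ chj > chi + 1 then false
    else slopeALoop ch rest

def slope_is_valid (slope : Int) : Bool :=
  let ch := decode_corner_heights slope
  match PySem.List.min? ch (fun x => x) with   -- ch has 6 elements, so min() never raises
  | none => false
  | some m => if m ≠ 0 then false else slopeALoop ch (PySem.List.pyRange 0 CORNER_COUNT 1)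

-- ===== PORT B =====
-- the frozenset literal _VALID_SLOPES: its 141 values are pairwise distinct, so the
-- PySem.Set is this list itself (= PySem.Set.ofList of the same literal)
def VALID_SLOPES : PySem.Set Int := [
    0, 1, 4, 5, 16, 17, 20, 21, 25, 64, 65, 68,
    69, 80, 81, 84, 85, 89, 100, 101, 105, 256, 257, 260,
    261, 272, 273, 276, 277, 281, 320, 321, 324, 325, 336, 337,
    340, 341, 345, 356, 357, 361, 400, 401, 404, 405, 409, 420,
    421, 425, 441, 1024, 1025, 1028, 1029, 1030, 1040, 1041, 1044, 1045,
    1046, 1049, 1050, 1088, 1089, 1092, 1093, 1094, 1104, 1105, 1108, 1109,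
    1110, 1113, 1114, 1124, 1125, 1126, 1129, 1130, 1134, 1280, 1281, 1284,
    1285, 1286, 1296, 1297, 1300, 1301, 1302, 1305, 1306, 1344, 1345, 1348,
    1349, 1350, 1360, 1361, 1364, 1380, 1424, 1425, 1428, 1444, 1600, 1601,
    1604, 1605, 1606, 1616, 1617, 1620, 1636, 1680, 1681, 1684, 1700, 1764,
    2305, 2309, 2310, 2321, 2325, 2326, 2329, 2330, 2331, 2369, 2373, 2374,
    2385, 2449, 2625, 2629, 2630, 2641, 2705, 2961, 3654
]

def slope_is_valid_alt (slope : Int) : Bool :=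
  PySem.Set.contains VALID_SLOPES (PySem.Int.mod slope 4096)

-- ===== PRECONDITION & SPEC =====
def Spec_slope_is_valid (slope : Int) (out : Bool) : Prop := out = slope_is_valid_alt slope
instance (slope : Int) (out : Bool) : Decidable (Spec_slope_is_valid slope out) := by unfold Spec_slope_is_valid; infer_instance

-- ===== CLAIM (what is proved, stated in full; the proofs are below) =====
def Claim_equal_slope_is_valid : Prop := ∀ (slope : Int), Dom_slope_is_valid slope → Spec_slope_is_valid slope (slope_is_valid slope)

-- ===== LEMMAS AND PROOFS =====
-- A's six base-4 digits depend only on slope % 4096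
theorem decode_period (slope : Int) :
    decode_corner_heights slope = decode_corner_heights (slope % 4096) := by
  have hr : PySem.List.pyRange 0 CORNER_COUNT 1 = [0,1,2,3,4,5] := by decide
  simp only [decode_corner_heights, hr, List.map, CORNER_WEIGHTS]
  norm_num [PySem.List.pyGet?, PySem.List.pyIdx?,
    (by decide : Int.toNat 2 = 2), (by decide : Int.toNat 3 = 3),
    (by decide : Int.toNat 4 = 4), (by decide : Int.toNat 5 = 5),
    List.getElem_cons_zero, List.getElem_cons_succ,
    PySem.Int.floordiv_eq_ediv_of_pos, PySem.Int.mod_eq_emod_of_pos]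
  and_intros <;> omega

theorem A_period (slope : Int) :
    slope_is_valid slope = slope_is_valid (slope % 4096) := by
  unfold slope_is_valid
  rw [decode_period]

theorem B_period (slope : Int) :
    slope_is_valid_alt slope = slope_is_valid_alt (slope % 4096) := by
  unfold slope_is_valid_alt
  have h4 : (0:Int) < 4096 := by norm_num
  rw [PySem.Int.mod_eq_emod_of_pos h4, PySem.Int.mod_eq_emod_of_pos h4,
    Int.emod_emod_of_dvd _ (dvd_refl 4096)]

-- divide-and-conquer checker: chk2 d lo = true means A = B on [lo, lo + 2^d)
-- (structural recursion of depth d keeps the kernel evaluation shallow)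
def chk2 : Nat → Nat → Bool
  | 0, lo => slope_is_valid (lo : Int) == slope_is_valid_alt (lo : Int)
  | d+1, lo => chk2 d lo && chk2 d (lo + 2^d)

theorem chk2_sound : ∀ d lo, chk2 d lo = true → ∀ n : Nat, lo ≤ n → n < lo + 2^d →
    slope_is_valid (n : Int) = slope_is_valid_alt (n : Int) := by
  intro d
  induction d with
  | zero =>
    intro lo h n h1 h2
    have hn : n = lo := by simp at h2; omega
    subst hn
    simpa [chk2] using h
  | succ d ih =>
    intro lo h n h1 h2
    rw [chk2, Bool.and_eq_true] at h
    by_cases hn : n < lo + 2^d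
    · exact ih lo h.1 n h1 hn
    · refine ih (lo + 2^d) h.2 n (by omega) ?_
      have : 2^(d+1) = 2^d + 2^d := by rw [pow_succ]; omega
      omega

set_option maxHeartbeats 4000000 in
set_option maxRecDepth 10000 in
theorem chk2_all : chk2 12 0 = true := by decide

theorem agree_small : ∀ n : Nat, n < 4096 →
    slope_is_valid (n : Int) = slope_is_valid_alt (n : Int) := by
  intro n hn
  exact chk2_sound 12 0 chk2_all n (Nat.zero_le _) (by norm_num; omega)

-- ===== VERDICT (by name: the statement is the Claim_ definition above) =====
theorem slope_is_valid_spec : Claim_equal_slope_is_valid := by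
  intro slope _
  unfold Spec_slope_is_valid
  rw [A_period, B_period]
  have h : slope % 4096 = ((slope % 4096).toNat : Int) := by omega
  rw [h]
  exact agree_small _ (by omega)
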